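-- pv_equiv track=rewrite | github.com/Simo672K/storyjoy-be | story/utils.py | array_item_prev_next
-- ===== SOURCE A (Python) =====
-- def array_item_prev_next(array: list, item) -> dict:
--   item = item
--   previous = next_ = None
--   l = len(array)
--   for index, obj in enumerate(array):
--       if obj == item:
--           if index > 0:
--               previous = array[index - 1]
--           if index < (l - 1):
--               next_ = array[index + 1]
--
--   output= {}
--   if previous != None and next_ != None:
--     output= {
--     'prv': previous,
--     'nxt': next_
--     }
--   else:
--     if previous != None:
--       output= {
--         'prv': previous
--       }
--
--     if next_ != None:
--       output= {
--         'nxt': next_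
--       }
--
--
--   return output
-- ===== SOURCE B (Python) =====
-- def array_item_prev_next(array: list, item) -> dict:
--     # Scan the REVERSED list: the first match seen is the last occurrence,
--     # so each neighbour is the first hit of a reversed pair scan (early exit).
--     rev = array[::-1]
--     prv = next((b for b, v in zip(rev[1:], rev) if v == item), None)
--     nxt = next((a for a, v in zip(rev, rev[1:]) if v == item), None)
--     output = {}
--     if prv is not None:
--         output['prv'] = prv
--     if nxt is not None:
--         output['nxt'] = nxt
--     return output
-- ===== Notes on version B (the rewrite author's own statement) =====
-- stated objective: alternative
-- what changed: Instead of A's forward scan that keeps overwriting two mutable neighbour variables until the end, B reverses the list and takes the FIRST matching element of two shifted zip pair-streams (next() with early exit), so no state is carried through the traversal.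
import Mathlib
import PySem

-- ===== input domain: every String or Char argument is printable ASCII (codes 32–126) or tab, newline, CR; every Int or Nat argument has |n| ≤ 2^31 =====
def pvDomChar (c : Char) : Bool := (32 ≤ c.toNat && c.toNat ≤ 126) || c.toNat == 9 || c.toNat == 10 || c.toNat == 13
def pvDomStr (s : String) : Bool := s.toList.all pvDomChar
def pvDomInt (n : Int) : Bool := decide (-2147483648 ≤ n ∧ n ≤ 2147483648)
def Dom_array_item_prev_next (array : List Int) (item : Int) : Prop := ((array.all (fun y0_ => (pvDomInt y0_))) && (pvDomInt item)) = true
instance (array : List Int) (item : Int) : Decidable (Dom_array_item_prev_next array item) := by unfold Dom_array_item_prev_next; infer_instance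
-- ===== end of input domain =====

-- B replaces A's forward overwrite-as-you-go scan by a first-match search over two
-- shifted zips of the REVERSED list (a different traversal); objective: alternative.

-- ===== PORT A =====
-- A's loop body: on a match, maybe overwrite `previous` and maybe overwrite `next_`.
def pvStepA (array : List Int) (item : Int) (l : Int)
    (st : Option Int × Option Int) (p : Int × Int) : Option Int × Option Int :=
  if p.2 == item then
    ((if p.1 > 0 then some (PySem.List.pyGetD array (p.1 - 1) 0) else st.1),
     (if p.1 < l - 1 then some (PySem.List.pyGetD array (p.1 + 1) 0) else st.2))
  else st

def array_item_prev_next (array : List Int) (item : Int) : List (String × Int) :=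
  let l : Int := array.length
  let st := (PySem.List.enumerate array).foldl (pvStepA array item l) (none, none)
  match st with
  | (some p, some n) => [("prv", p), ("nxt", n)]
  | (some p, none)   => [("prv", p)]
  | (none, some n)   => [("nxt", n)]
  | (none, none)     => []

-- ===== PORT B =====
-- rev = array[::-1] is List.reverse (PySem.List.slice?_none_none_neg_one); rev[1:] is slice;
-- next(gen, None) over a zip is List.find? of the pair predicate, mapped to the kept component.
def array_item_prev_next_alt (array : List Int) (item : Int) : List (String × Int) :=
  let rev := array.reverse
  let tl := PySem.List.slice rev (some 1) none
  let prv : Option Int := ((tl.zip rev).find? (fun p => p.2 == item)).map (·.1)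
  let nxt : Option Int := ((rev.zip tl).find? (fun p => p.2 == item)).map (·.1)
  (match prv with | some b => [("prv", b)] | none => []) ++
  (match nxt with | some a => [("nxt", a)] | none => [])

-- ===== PRECONDITION & SPEC =====
def Spec_array_item_prev_next (array : List Int) (item : Int) (out : List (String × Int)) : Prop := out = array_item_prev_next_alt array item
instance (array : List Int) (item : Int) (out : List (String × Int)) : Decidable (Spec_array_item_prev_next array item out) := by unfold Spec_array_item_prev_next; infer_instance

-- ===== CLAIM (what is proved, stated in full; the proofs are below) =====
def Claim_equal_array_item_prev_next : Prop := ∀ (array : List Int) (item : Int), Dom_array_item_prev_next array item → Spec_array_item_prev_next array item (array_item_prev_next array item)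

-- ===== LEMMAS AND PROOFS =====

-- The fold's final state, componentwise: each component is the neighbour of the LAST
-- enumerated pair passing its own guard, or the initial value if none passes.
theorem pv_fold_char (array : List Int) (item : Int) (l : Int) :
    ∀ (ps : List (Int × Int)) (a b : Option Int),
      ps.foldl (pvStepA array item l) (a, b) =
        ((ps.filter (fun p => p.2 == item && decide (p.1 > 0))).getLast?.elim a
            (fun p => some (PySem.List.pyGetD array (p.1 - 1) 0)),
         (ps.filter (fun p => p.2 == item && decide (p.1 < l - 1))).getLast?.elim b
            (fun p => some (PySem.List.pyGetD array (p.1 + 1) 0))) := by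
  intro ps
  induction ps with
  | nil => intro a b; simp
  | cons p tl ih =>
    intro a b
    simp only [List.foldl_cons, List.filter_cons]
    rw [ih]
    by_cases hm : p.2 = item
    · simp only [pvStepA, hm, BEq.rfl, if_true, Bool.true_and]
      refine Prod.ext ?_ ?_
      · by_cases hg : p.1 > 0
        · simp only [hg, decide_true, if_true, List.getLast?_cons]
          cases h : (tl.filter (fun q => q.2 == item && decide (q.1 > 0))).getLast? <;>
            simp
        · simp [hg]
      · by_cases hg : p.1 < l - 1
        · simp only [hg, decide_true, if_true, List.getLast?_cons]
          cases h : (tl.filter (fun q => q.2 == item && decide (q.1 < l - 1))).getLast? <;>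
            simp
        · simp [hg]
    · simp [pvStepA, hm]

theorem pv_enum_append (xs : List Int) (x : Int) : ∀ s : Int,
    PySem.List.enumerate (xs ++ [x]) s = PySem.List.enumerate xs s ++ [(s + xs.length, x)] := by
  induction xs with
  | nil => intro s; simp [PySem.List.enumerate_cons, PySem.List.enumerate_nil]
  | cons y ys ih =>
    intro s
    simp only [List.cons_append, PySem.List.enumerate_cons, ih (s + 1), List.length_cons]
    have : s + 1 + (ys.length : Int) = s + ((ys.length + 1 : Nat) : Int) := by push_cast; ring
    rw [this]

theorem pv_mem_enum_bounds (xs : List Int) (p : Int × Int)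
    (hp : p ∈ PySem.List.enumerate xs 0) : 0 ≤ p.1 ∧ p.1 < xs.length := by
  have h1 : p.1 ∈ (PySem.List.enumerate xs 0).map (·.1) := List.mem_map_of_mem hp
  rw [PySem.List.map_fst_enumerate] at h1
  have := (PySem.List.mem_pyRange_one).1 h1
  omega

-- PRV correspondence, as full lists: A's reversed-filtered enumerate, mapped to the
-- left neighbour, is B's filtered (left-neighbour, value) reversed pair stream.
theorem pv_getD_append (xs : List Int) (x : Int) (i : Int) (h0 : 0 ≤ i) (h1 : i < xs.length) :
    PySem.List.pyGetD (xs ++ [x]) i 0 = PySem.List.pyGetD xs i 0 := by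
  rw [PySem.List.pyGetD_eq_getElem (xs ++ [x]) 0 (by omega) (by simp; omega),
      PySem.List.pyGetD_eq_getElem xs 0 h0 h1]
  exact List.getElem_append_left (by omega)

theorem pv_getD_last (xs : List Int) (x : Int) (hxs : xs ≠ []) :
    PySem.List.pyGetD (xs ++ [x]) ((xs.length : Int) - 1) 0 = xs.getLast hxs := by
  have hl : 0 < xs.length := List.length_pos_iff.2 hxs
  rw [PySem.List.pyGetD_eq_getElem (xs ++ [x]) 0 (by omega)
        (by simp only [List.length_append, List.length_cons, List.length_nil]; push_cast; omega)]
  have ht : ((xs.length : Int) - 1).toNat = xs.length - 1 := by omega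
  rw [List.getLast_eq_getElem]
  simp only [ht]
  exact List.getElem_append_left (by omega)

theorem pv_getD_at_len (xs : List Int) (y : Int) :
    PySem.List.pyGetD (xs ++ [y]) ((xs.length : Int)) 0 = y := by
  rw [PySem.List.pyGetD_eq_getElem (xs ++ [y]) 0 (by omega) (by simp)]
  have : ((xs.length : Int)).toNat = xs.length := by omega
  simp only [this]
  simp

theorem pv_prv_lists (item : Int) : ∀ (xs : List Int),
    (((PySem.List.enumerate xs).reverse.filter
        (fun p => p.2 == item && decide (p.1 > 0))).map
      (fun p => PySem.List.pyGetD xs (p.1 - 1) 0))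
    = ((xs.reverse.tail.zip xs.reverse).filter (fun p => p.2 == item)).map (·.1) := by
  intro xs
  induction xs using List.reverseRecOn with
  | nil => simp [PySem.List.enumerate]
  | append_singleton xs x ih =>
    rw [pv_enum_append xs x 0]
    rcases hxr : xs.reverse with _ | ⟨b, t⟩
    · -- xs = []
      have hxs : xs = [] := by simpa using congrArg List.reverse hxr
      subst hxs
      simp [PySem.List.enumerate]
    · -- xs nonempty, last element b
      have hxs : xs ≠ [] := by
        intro h; rw [h] at hxr; simp at hxr
      have hb : xs.getLast hxs = b := by
        have := List.getLast?_eq_head?_reverse (xs := xs)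
        rw [hxr] at this
        rw [List.getLast?_eq_some_getLast hxs] at this
        simpa using this
      have hl : 0 < xs.length := List.length_pos_iff.2 hxs
      -- tail part: replace pyGetD (xs++[x]) by pyGetD xs on members
      have hcong :
          ((PySem.List.enumerate xs).reverse.filter
              (fun p => p.2 == item && decide (p.1 > 0))).map
            (fun p => PySem.List.pyGetD (xs ++ [x]) (p.1 - 1) 0)
          = ((PySem.List.enumerate xs).reverse.filter
              (fun p => p.2 == item && decide (p.1 > 0))).map
            (fun p => PySem.List.pyGetD xs (p.1 - 1) 0) := by
        apply List.map_congr_left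
        intro p hp
        have hmem : p ∈ PySem.List.enumerate xs 0 :=
          List.mem_reverse.1 (List.mem_of_mem_filter hp)
        have hbd := pv_mem_enum_bounds xs p hmem
        have hpos : p.1 > 0 := by
          have := (List.mem_filter.1 hp).2
          simp at this; exact this.2
        exact pv_getD_append xs x (p.1 - 1) (by omega) (by omega)
      rw [List.reverse_append]
      simp only [List.reverse_singleton, List.singleton_append, List.filter_cons]
      rw [List.reverse_append, List.reverse_singleton, List.singleton_append,
          List.tail_cons, hxr, List.zip_cons_cons, List.filter_cons]
      by_cases hm : (x == item) = true
      · rw [if_pos (by simp only [hm, Bool.true_and, decide_eq_true_eq]; omega),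
            if_pos hm, List.map_cons, List.map_cons]
        congr 1
        · show PySem.List.pyGetD (xs ++ [x]) (0 + (xs.length : Int) - 1) 0 = b
          rw [zero_add, pv_getD_last xs x hxs, hb]
        · rw [hcong, ih, hxr]; rfl
      · rw [if_neg (by simp [hm]), if_neg (by simp [hm])]
        rw [hcong, ih, hxr]; rfl

-- NXT correspondence, generalized over the element y appended on the right.
theorem pv_nxt_lists (item : Int) : ∀ (xs : List Int) (y : Int),
    (((PySem.List.enumerate xs).reverse.filter (fun p => p.2 == item)).map
      (fun p => PySem.List.pyGetD (xs ++ [y]) (p.1 + 1) 0))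
    = (((y :: xs.reverse).zip xs.reverse).filter (fun p => p.2 == item)).map (·.1) := by
  intro xs
  induction xs using List.reverseRecOn with
  | nil => intro y; simp [PySem.List.enumerate]
  | append_singleton xs x ih =>
    intro y
    rw [pv_enum_append xs x 0]
    have hcong :
        ((PySem.List.enumerate xs).reverse.filter (fun p => p.2 == item)).map
          (fun p => PySem.List.pyGetD ((xs ++ [x]) ++ [y]) (p.1 + 1) 0)
        = ((PySem.List.enumerate xs).reverse.filter (fun p => p.2 == item)).map
          (fun p => PySem.List.pyGetD (xs ++ [x]) (p.1 + 1) 0) := by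
      apply List.map_congr_left
      intro p hp
      have hmem : p ∈ PySem.List.enumerate xs 0 :=
        List.mem_reverse.1 (List.mem_of_mem_filter hp)
      have hbd := pv_mem_enum_bounds xs p hmem
      exact pv_getD_append (xs ++ [x]) y (p.1 + 1) (by omega) (by simp; omega)
    rw [List.reverse_append]
    simp only [List.reverse_singleton, List.singleton_append, List.filter_cons]
    rw [List.reverse_append, List.reverse_singleton, List.singleton_append,
        List.zip_cons_cons, List.filter_cons]
    by_cases hm : (x == item) = true
    · rw [if_pos hm, if_pos hm, List.map_cons, List.map_cons]
      congr 1
      · show PySem.List.pyGetD ((xs ++ [x]) ++ [y]) (0 + (xs.length : Int) + 1) 0 = y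
        have : (0 : Int) + (xs.length : Int) + 1 = (((xs ++ [x]).length : Nat) : Int) := by
          simp
        rw [this, pv_getD_at_len (xs ++ [x]) y]
      · rw [List.append_assoc] at hcong
        rw [List.append_assoc, hcong]
        exact ih x
    · rw [if_neg (by simp [hm]), if_neg (by simp [hm])]
      rw [List.append_assoc] at hcong
      rw [List.append_assoc, hcong]
      exact ih x

theorem pv_elim_map (o : Option (Int × Int)) (f : Int × Int → Int) :
    o.elim none (fun p => some (f p)) = o.map f := by cases o <;> rfl

theorem pv_both (array : List Int) (item : Int) :
    array_item_prev_next array item = array_item_prev_next_alt array item := by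
  have hprv : (((PySem.List.enumerate array).filter
        (fun p => p.2 == item && decide (p.1 > 0))).getLast?).elim none
        (fun p => some (PySem.List.pyGetD array (p.1 - 1) 0))
      = ((array.reverse.tail.zip array.reverse).find? (fun p => p.2 == item)).map (·.1) := by
    rw [pv_elim_map, List.getLast?_eq_head?_reverse, ← List.filter_reverse,
        ← List.head?_map, pv_prv_lists item array, ← List.head?_filter, ← List.head?_map]
  have hnxt : (((PySem.List.enumerate array).filter
        (fun p => p.2 == item && decide (p.1 < (array.length : Int) - 1))).getLast?).elim none
        (fun p => some (PySem.List.pyGetD array (p.1 + 1) 0))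
      = ((array.reverse.zip array.reverse.tail).find? (fun p => p.2 == item)).map (·.1) := by
    rcases List.eq_nil_or_concat array with rfl | ⟨as, x, rfl⟩
    · simp [PySem.List.enumerate_nil]
    · simp only [List.concat_eq_append]
      have hsing : ([((0 : Int) + (as.length : Int), x)].filter
          (fun p => p.2 == item && decide (p.1 < ((as ++ [x]).length : Int) - 1))) = [] := by
        simp only [List.filter_cons, List.filter_nil]
        rw [if_neg]
        simp only [Bool.and_eq_true, decide_eq_true_eq, not_and]
        intro _
        simp only [List.length_append, List.length_cons, List.length_nil]
        push_cast
        omega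
      have hfil : ((PySem.List.enumerate (as ++ [x])).filter
            (fun p => p.2 == item && decide (p.1 < ((as ++ [x]).length : Int) - 1)))
          = (PySem.List.enumerate as).filter (fun p => p.2 == item) := by
        rw [pv_enum_append as x 0, List.filter_append, hsing, List.append_nil]
        apply List.filter_congr
        intro p hp
        have hbd := pv_mem_enum_bounds as p hp
        have hd : decide (p.1 < ((as ++ [x]).length : Int) - 1) = true := by
          simp only [decide_eq_true_eq, List.length_append, List.length_cons, List.length_nil]
          push_cast
          omega
        rw [hd, Bool.and_true]
      rw [hfil, pv_elim_map, List.getLast?_eq_head?_reverse, ← List.filter_reverse,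
          ← List.head?_map, pv_nxt_lists item as x, List.reverse_append,
          List.reverse_singleton, List.singleton_append, List.tail_cons,
          ← List.head?_filter, ← List.head?_map]
  unfold array_item_prev_next array_item_prev_next_alt
  dsimp only
  rw [pv_fold_char array item ((array.length : Int)) (PySem.List.enumerate array) none none]
  rw [PySem.List.slice_from_one]
  rw [hprv, hnxt]
  cases ((array.reverse.tail.zip array.reverse).find? (fun p => p.2 == item)).map (·.1) <;>
    cases ((array.reverse.zip array.reverse.tail).find? (fun p => p.2 == item)).map (·.1) <;>
      rfl

-- ===== VERDICT (by name: the statement is the Claim_ definition above) =====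
theorem array_item_prev_next_spec : Claim_equal_array_item_prev_next := by
  intro array item _
  exact pv_both array item
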